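-- pv_equiv track=rewrite | github.com/bestmahdi2/QueraSolutions | Solved/FeshordeSazi Khas/FeshordeSazi Khas.py | feshar
-- ===== SOURCE A (Python) =====
-- def feshar(n):
--     n = str(n)
--     new = []
--     shomaresh = ""
--     string = ""
--
--     for i in n:
--         if i not in new:
--             new.append(i)
--
--     for j in new:
--         string += (j)
--         q = n.count(j)
--         if q >= 2:
--             shomaresh += str(q)
--
--     res = string + shomaresh
--     res = list(res)
--     res.sort()
--     p = ""
--
--     for k in res:
--         p += k
--
--     return p
-- ===== SOURCE B (Python) =====
-- def feshar(n):
--     s = sorted(str(n))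
--     chars = []
--     i = 0
--     while i < len(s):
--         j = i + 1
--         while j < len(s) and s[j] == s[i]:
--             j += 1
--         cnt = j - i
--         chars.append(s[i])
--         if cnt >= 2:
--             chars.extend(str(cnt))
--         i = j
--     return ''.join(sorted(chars))
-- ===== Notes on version B (the rewrite author's own statement) =====
-- stated objective: alternative
-- what changed: Replaces A's first-appearance uniqueness scan plus a repeated n.count rescan per distinct character with a single sort of str(n) followed by one consecutive-run scan that emits each run's character and its length's digits; the terminal sort makes the orders agree.
import Mathlib
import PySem

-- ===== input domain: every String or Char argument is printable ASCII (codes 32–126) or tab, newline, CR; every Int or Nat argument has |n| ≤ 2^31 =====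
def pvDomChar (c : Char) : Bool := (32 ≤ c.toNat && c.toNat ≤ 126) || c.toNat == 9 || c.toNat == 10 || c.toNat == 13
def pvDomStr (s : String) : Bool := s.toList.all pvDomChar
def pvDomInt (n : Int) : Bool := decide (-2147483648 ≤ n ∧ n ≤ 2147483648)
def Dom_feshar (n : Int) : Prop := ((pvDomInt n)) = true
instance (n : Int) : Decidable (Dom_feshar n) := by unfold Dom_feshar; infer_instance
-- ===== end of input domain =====

-- B replaces A's first-appearance dedup scan + per-character n.count rescans by one sort of
-- str(n) followed by a single consecutive-run scan; the terminal sort makes the results equal.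

-- ===== PORT A =====
def feshar (n : Int) : String :=
  let s := PySem.Int.toChars n                                   -- n = str(n)
  let new := s.foldl (fun new i => if i ∈ new then new else new ++ [i]) []
  let st := new.foldl (fun (st : List Char × List Char) j =>     -- (string, shomaresh)
      let q := ((s.count j : Int))                               -- q = n.count(j)
      (st.1 ++ [j], if q ≥ 2 then st.2 ++ PySem.Int.toChars q else st.2)) ([], [])
  let res := PySem.List.sorted (st.1 ++ st.2) (fun x => x) false -- res.sort()
  String.ofList (res.foldl (fun p k => p ++ [k]) [])             -- for k in res: p += k

-- ===== PORT B =====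
-- the outer while-loop of Source B: at each position take the whole run of equal characters
-- (the inner "while s[j] == s[i]" scan is exactly takeWhile/dropWhile on the rest), emit the
-- run's character and, for a run of length >= 2, the digits of its length.
def feshRuns : List Char → List Char
  | [] => []
  | c :: rest =>
      let cnt := (rest.takeWhile (· == c)).length + 1
      (if 2 ≤ cnt then c :: PySem.Int.toChars (cnt : Int) else [c])
        ++ feshRuns (rest.dropWhile (· == c))
termination_by l => l.length
decreasing_by
  simpa using Nat.lt_succ_of_le (List.length_dropWhile_le (· == c) rest)

def feshar_alt (n : Int) : String :=
  let s := PySem.List.sorted (PySem.Int.toChars n) (fun x => x) false  -- s = sorted(str(n))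
  String.ofList (PySem.List.sorted (feshRuns s) (fun x => x) false)    -- ''.join(sorted(chars))

-- ===== PRECONDITION & SPEC =====
def Spec_feshar (n : Int) (out : String) : Prop := out = feshar_alt n
instance (n : Int) (out : String) : Decidable (Spec_feshar n out) := by unfold Spec_feshar; infer_instance

-- ===== CLAIM (what is proved, stated in full; the proofs are below) =====
def Claim_equal_feshar : Prop := ∀ (n : Int), Dom_feshar n → Spec_feshar n (feshar n)

-- ===== LEMMAS AND PROOFS =====

-- the digit characters A's second loop appends for character c (empty when the count is < 2)
def digitsOf (s : List Char) (c : Char) : List Char :=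
  if ((s.count c : Int)) ≥ 2 then PySem.Int.toChars ((s.count c : Int)) else []

lemma add_eq_loop : @PySem.Set.add Char _ = (fun new i => if i ∈ new then new else new ++ [i]) := by
  funext l x; simp [PySem.Set.add]

lemma pairfold (s : List Char) (new : List Char) (a b : List Char) :
    new.foldl (fun (st : List Char × List Char) j =>
      let q := ((s.count j : Int))
      (st.1 ++ [j], if q ≥ 2 then st.2 ++ PySem.Int.toChars q else st.2)) (a, b)
    = (a ++ new, b ++ new.flatMap (digitsOf s)) := by
  induction new generalizing a b with
  | nil => simp
  | cons c t ih =>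
      simp only [List.foldl_cons, List.flatMap_cons, ih]
      unfold digitsOf
      split_ifs with h <;> simp

lemma not_mem_dropWhile (c : Char) (rest : List Char)
    (hle : ∀ x ∈ rest, c ≤ x) (hp : rest.Pairwise (· ≤ ·)) :
    c ∉ rest.dropWhile (· == c) := by
  induction rest with
  | nil => simp
  | cons d t ih =>
      rcases List.pairwise_cons.mp hp with ⟨hd, ht⟩
      by_cases h : d = c
      · subst h
        rw [List.dropWhile_cons_of_pos (by simp)]
        exact ih (fun x hx => hle x (List.mem_cons_of_mem _ hx)) ht
      · rw [List.dropWhile_cons_of_neg (by simp [h])]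
        intro hc
        rcases List.mem_cons.mp hc with rfl | hc
        · exact h rfl
        · exact h (le_antisymm (hd c hc) (hle d (List.mem_cons_self)))

lemma count_run (c : Char) (rest : List Char) :
    (rest.takeWhile (· == c)).count c = (rest.takeWhile (· == c)).length := by
  apply List.count_eq_length.mpr
  intro b hb
  have hb' : (b == c) = true := List.mem_takeWhile_imp (p := fun x => x == c) hb
  exact (eq_of_beq hb').symm

lemma count_head (c : Char) (rest : List Char) (hnm : c ∉ rest.dropWhile (· == c)) :
    (c :: rest).count c = (rest.takeWhile (· == c)).length + 1 := by
  rw [List.count_cons_self]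
  conv_lhs => rw [← List.takeWhile_append_dropWhile (p := (· == c)) (l := rest)]
  rw [List.count_append, count_run, List.count_eq_zero.mpr hnm]

lemma count_tail (c x : Char) (rest : List Char) (hx : x ≠ c) :
    (c :: rest).count x = (rest.dropWhile (· == c)).count x := by
  rw [List.count_cons_of_ne (Ne.symm hx)]
  conv_lhs => rw [← List.takeWhile_append_dropWhile (p := (· == c)) (l := rest)]
  rw [List.count_append, List.count_eq_zero.mpr, Nat.zero_add]
  intro hmem
  have hm' : (x == c) = true := List.mem_takeWhile_imp (p := fun x => x == c) hmem
  exact hx (eq_of_beq hm')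

lemma dedup_perm_cons (c : Char) (rest : List Char) (hnm : c ∉ rest.dropWhile (· == c)) :
    (PySem.List.dedup (c :: rest)).Perm (c :: PySem.List.dedup (rest.dropWhile (· == c))) := by
  apply (List.perm_ext_iff_of_nodup (PySem.List.nodup_dedup _) ?_).mpr
  · intro x
    simp only [PySem.List.mem_dedup, List.mem_cons]
    constructor
    · rintro (rfl | hx)
      · exact Or.inl rfl
      · rw [← List.takeWhile_append_dropWhile (p := (· == c)) (l := rest)] at hx
        rcases List.mem_append.mp hx with h | h
        · exact Or.inl (eq_of_beq (List.mem_takeWhile_imp (p := fun x => x == c) h))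
        · exact Or.inr h
    · rintro (rfl | hx)
      · exact Or.inl rfl
      · exact Or.inr ((List.dropWhile_sublist _).mem hx)
  · exact List.nodup_cons.mpr ⟨fun h => hnm ((PySem.List.mem_dedup _ _).mp h),
      PySem.List.nodup_dedup _⟩

lemma feshRuns_perm (t : List Char) (ht : t.Pairwise (· ≤ ·)) :
    (feshRuns t).Perm
      (PySem.List.dedup t ++ (PySem.List.dedup t).flatMap (digitsOf t)) := by
  induction t using feshRuns.induct with
  | case1 => simp [feshRuns, PySem.List.dedup]
  | case2 c rest ih =>
      rcases List.pairwise_cons.mp ht with ⟨hle, hp⟩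
      have hnm : c ∉ rest.dropWhile (· == c) := not_mem_dropWhile c rest hle hp
      have hpt : (rest.dropWhile (· == c)).Pairwise (· ≤ ·) :=
        List.Pairwise.sublist (List.dropWhile_sublist _) hp
      have h2 := ih hpt
      have h3 : (PySem.List.dedup (rest.dropWhile (· == c))).flatMap
            (digitsOf (rest.dropWhile (· == c)))
          = (PySem.List.dedup (rest.dropWhile (· == c))).flatMap (digitsOf (c :: rest)) := by
        apply List.flatMap_congr
        intro x hx
        have hxt : x ∈ rest.dropWhile (· == c) := (PySem.List.mem_dedup _ _).mp hx
        have hxc : x ≠ c := fun h => hnm (h ▸ hxt)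
        unfold digitsOf
        rw [count_tail c x rest hxc]
      have h1 : feshRuns (c :: rest)
          = (c :: digitsOf (c :: rest) c) ++ feshRuns (rest.dropWhile (· == c)) := by
        rw [feshRuns]
        congr 1
        unfold digitsOf
        rw [count_head c rest hnm]
        split_ifs with ha hb hb
        · push_cast; ring_nf
        · omega
        · omega
        · rfl
      have h4 := dedup_perm_cons c rest hnm
      have p1 : (feshRuns (c :: rest)).Perm
          ((c :: digitsOf (c :: rest) c) ++
            (PySem.List.dedup (rest.dropWhile (· == c)) ++
             (PySem.List.dedup (rest.dropWhile (· == c))).flatMap (digitsOf (c :: rest)))) := by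
        rw [h1]
        exact List.Perm.append_left _ (h3 ▸ h2)
      have p2 : ((c :: digitsOf (c :: rest) c) ++
            (PySem.List.dedup (rest.dropWhile (· == c)) ++
             (PySem.List.dedup (rest.dropWhile (· == c))).flatMap (digitsOf (c :: rest)))).Perm
          ((c :: PySem.List.dedup (rest.dropWhile (· == c))) ++
            (digitsOf (c :: rest) c ++
             (PySem.List.dedup (rest.dropWhile (· == c))).flatMap (digitsOf (c :: rest)))) := by
        simp only [List.cons_append]
        exact (List.perm_append_comm_assoc _ _ _).cons c
      have p3 : (c :: PySem.List.dedup (rest.dropWhile (· == c))) ++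
            (digitsOf (c :: rest) c ++
             (PySem.List.dedup (rest.dropWhile (· == c))).flatMap (digitsOf (c :: rest)))
          = (c :: PySem.List.dedup (rest.dropWhile (· == c))) ++
            ((c :: PySem.List.dedup (rest.dropWhile (· == c))).flatMap (digitsOf (c :: rest))) := by
        simp
      have p4 : ((c :: PySem.List.dedup (rest.dropWhile (· == c))) ++
            ((c :: PySem.List.dedup (rest.dropWhile (· == c))).flatMap (digitsOf (c :: rest)))).Perm
          (PySem.List.dedup (c :: rest) ++
            (PySem.List.dedup (c :: rest)).flatMap (digitsOf (c :: rest))) :=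
        List.Perm.append h4.symm (List.Perm.flatMap_right _ h4.symm)
      exact p1.trans (p2.trans (p3 ▸ p4))

theorem feshar_spec : Claim_equal_feshar := by
  intro n _
  unfold Spec_feshar feshar feshar_alt
  have hnew : (PySem.Int.toChars n).foldl
      (fun new i => if i ∈ new then new else new ++ [i]) [] = PySem.List.dedup (PySem.Int.toChars n) := by
    rw [← add_eq_loop]
    simp [PySem.List.dedup_eq_ofList, PySem.Set.ofList]
  simp only [hnew, pairfold, PySem.List.foldl_append_singleton_eq_self, List.nil_append]
  congr 1
  apply PySem.List.sorted_eq_sorted_of_perm _ _ _ (fun a b h => h)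
  have hsorted : (PySem.List.sorted (PySem.Int.toChars n) (fun x => x) false).Pairwise (· ≤ ·) := by
    have := PySem.List.sorted_pairwise (PySem.Int.toChars n) (fun x => x)
    simpa using this
  have hdig : digitsOf (PySem.List.sorted (PySem.Int.toChars n) (fun x => x) false)
      = digitsOf (PySem.Int.toChars n) := by
    funext c
    unfold digitsOf
    rw [List.Perm.count (PySem.List.sorted_perm _ _ _) c]
  have hded : (PySem.List.dedup (PySem.List.sorted (PySem.Int.toChars n) (fun x => x) false)).Perm
      (PySem.List.dedup (PySem.Int.toChars n)) := by
    apply (List.perm_ext_iff_of_nodup (PySem.List.nodup_dedup _) (PySem.List.nodup_dedup _)).mpr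
    intro x
    rw [PySem.List.mem_dedup, PySem.List.mem_dedup, PySem.List.mem_sorted]
  refine List.Perm.symm ?_
  refine (feshRuns_perm _ hsorted).trans ?_
  rw [hdig]
  exact List.Perm.append hded (List.Perm.flatMap_right _ hded)
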